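-- pv_equiv track=rewrite | github.com/ilgrisha/CornStructor | backend/app/core/assembly/fitness_utils.py | max_same_base_run
-- ===== SOURCE A (Python) =====
-- def max_same_base_run(seq: str) -> int:
--     """Maximum homopolymer run length in the sequence."""
--     if not seq:
--         return 0
--     best = 1
--     curr = 1
--     for i in range(1, len(seq)):
--         if seq[i] == seq[i - 1]:
--             curr += 1
--             if curr > best:
--                 best = curr
--         else:
--             curr = 1
--     return best
-- ===== SOURCE B (Python) =====
-- def max_same_base_run(seq: str) -> int:
--     """Maximum homopolymer run length: scan run-by-run with two pointers."""
--     best = 0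
--     i, n = 0, len(seq)
--     while i < n:
--         j = i + 1
--         while j < n and seq[j] == seq[i]:
--             j += 1
--         best = max(best, j - i)
--         i = j
--     return best
-- ===== Notes on version B (the rewrite author's own statement) =====
-- stated objective: alternative
-- what changed: Replaces the per-index neighbor comparison with running curr/best counters by a two-pointer run scanner: an inner scan finds each maximal run's end, and best is the max of whole run lengths.
import Mathlib
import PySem

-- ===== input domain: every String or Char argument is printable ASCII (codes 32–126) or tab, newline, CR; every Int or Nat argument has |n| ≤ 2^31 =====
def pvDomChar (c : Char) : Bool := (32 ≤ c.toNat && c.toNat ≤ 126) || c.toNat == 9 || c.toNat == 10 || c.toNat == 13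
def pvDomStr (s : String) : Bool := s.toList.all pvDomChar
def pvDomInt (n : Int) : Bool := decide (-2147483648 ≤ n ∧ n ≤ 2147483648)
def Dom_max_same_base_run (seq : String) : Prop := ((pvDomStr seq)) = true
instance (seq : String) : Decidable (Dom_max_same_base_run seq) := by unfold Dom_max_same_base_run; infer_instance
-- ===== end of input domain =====

-- B replaces A's per-index neighbor comparison with curr/best counters by a
-- two-pointer run scanner (max over whole maximal-run lengths); same O(n) cost.


-- ===== PORT A =====
-- A's loop 'for i in range(1, len(seq))' compares seq[i] with seq[i-1]; ported as a
-- structural recursion carrying the previous character together with curr and best.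
def pvLoopA (prev : Char) (curr best : Int) : List Char → Int
  | [] => best
  | c :: cs =>
    if c == prev then
      let curr' := curr + 1
      pvLoopA c curr' (if curr' > best then curr' else best) cs
    else
      pvLoopA c 1 best cs

def max_same_base_run (seq : String) : Int :=
  match seq.toList with
  | [] => 0
  | c :: cs => pvLoopA c 1 1 cs

-- ===== PORT B =====
-- B's inner 'while j < n and seq[j] == seq[i]' is the takeWhile/dropWhile split of
-- the remainder; the outer while-loop is the tail recursion on the rest.
def pvLoopB (best : Int) (cs : List Char) : Int :=
  match cs with
  | [] => best
  | c :: rest =>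
    pvLoopB (max best (1 + ((rest.takeWhile (· == c)).length : Int))) (rest.dropWhile (· == c))
termination_by cs.length
decreasing_by
  simpa using Nat.lt_succ_of_le (List.length_dropWhile_le _ _)

def max_same_base_run_alt (seq : String) : Int := pvLoopB 0 seq.toList

-- ===== PRECONDITION & SPEC =====
def Spec_max_same_base_run (seq : String) (out : Int) : Prop := out = max_same_base_run_alt seq
instance (seq : String) (out : Int) : Decidable (Spec_max_same_base_run seq out) := by unfold Spec_max_same_base_run; infer_instance

-- ===== CLAIM (what is proved, stated in full; the proofs are below) =====
def Claim_equal_max_same_base_run : Prop := ∀ (seq : String), Dom_max_same_base_run seq → Spec_max_same_base_run seq (max_same_base_run seq)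

-- ===== LEMMAS AND PROOFS =====

-- run lengths of the sequence prev::cs, with the first run already counted as k
def pvGo (c : Char) (k : Int) : List Char → List Int
  | [] => [k]
  | d :: ds => if d == c then pvGo d (k + 1) ds else k :: pvGo d 1 ds

def pvRuns : List Char → List Int
  | [] => []
  | c :: cs => pvGo c 1 cs

def pvM (l : List Int) : Int := l.foldl max 0

theorem pvFoldlMax_init (l : List Int) (a b : Int) :
    List.foldl max (max a b) l = max a (List.foldl max b l) := by
  induction l generalizing a b with
  | nil => rfl
  | cons x l ih =>
    simp only [List.foldl_cons, max_assoc]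
    exact ih a (max b x)

theorem pvM_cons (x : Int) (l : List Int) : pvM (x :: l) = max x (pvM l) := by
  simp only [pvM, List.foldl_cons]
  rw [max_comm 0 x, pvFoldlMax_init]

theorem le_pvM_go (cs : List Char) (c : Char) (k : Int) : k ≤ pvM (pvGo c k cs) := by
  induction cs generalizing c k with
  | nil => simp [pvGo, pvM]
  | cons d ds ih =>
    simp only [pvGo]
    split
    · have := ih d (k + 1); omega
    · rw [pvM_cons]; omega

theorem pvLoopA_eq (cs : List Char) (prev : Char) (curr best : Int)
    (h1 : 1 ≤ best) (h2 : curr ≤ best) :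
    pvLoopA prev curr best cs = max best (pvM (pvGo prev curr cs)) := by
  induction cs generalizing prev curr best with
  | nil =>
    simp only [pvLoopA, pvGo, pvM, List.foldl]
    omega
  | cons c cs ih =>
    simp only [pvLoopA, pvGo]
    split
    · have hif : (if curr + 1 > best then curr + 1 else best) = max best (curr + 1) := by
        split <;> omega
      rw [hif, ih c (curr + 1) (max best (curr + 1)) (by omega) (by omega)]
      have := le_pvM_go cs c (curr + 1)
      omega
    · rw [ih c 1 best h1 h1, pvM_cons]
      omega

theorem pvGo_span (cs : List Char) (c : Char) (k : Int) :
    pvGo c k cs = (k + ((cs.takeWhile (· == c)).length : Int)) :: pvRuns (cs.dropWhile (· == c)) := by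
  induction cs generalizing c k with
  | nil => simp [pvGo, pvRuns]
  | cons d ds ih =>
    simp only [pvGo, List.takeWhile, List.dropWhile]
    by_cases h : d == c
    · have hdc : d = c := by simpa using h
      subst hdc
      simp only [h, if_true, ih d (k + 1), List.length_cons]
      congr 1
      push_cast
      ring
    · simp [h, pvRuns]

theorem pvLoopB_eq (best : Int) (cs : List Char) (h : 0 ≤ best) :
    pvLoopB best cs = max best (pvM (pvRuns cs)) := by
  induction best, cs using pvLoopB.induct with
  | case1 best => simp [pvLoopB, pvRuns, pvM]; omega
  | case2 best c rest ih =>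
    rw [pvLoopB]
    have hm : pvM (pvRuns (c :: rest)) =
        max (1 + ((rest.takeWhile (· == c)).length : Int))
          (pvM (pvRuns (rest.dropWhile (· == c)))) := by
      show pvM (pvGo c 1 rest) = _
      rw [pvGo_span rest c 1, pvM_cons]
    rw [ih (by omega), hm]
    omega

-- ===== VERDICT (by name: the statement is the Claim_ definition above) =====
theorem max_same_base_run_spec : Claim_equal_max_same_base_run := by
  intro seq _
  unfold Spec_max_same_base_run max_same_base_run max_same_base_run_alt
  cases hs : seq.toList with
  | nil => simp [pvLoopB]
  | cons c cs =>
    show pvLoopA c 1 1 cs = pvLoopB 0 (c :: cs)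
    rw [pvLoopA_eq cs c 1 1 le_rfl le_rfl, pvLoopB_eq 0 (c :: cs) le_rfl]
    have h1 := le_pvM_go cs c 1
    simp only [pvRuns]
    omega
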